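-- pv_equiv track=rewrite | github.com/yejin087/2022-Algorithm-Study | 01-Greedy/kej/Q01_모험가길드.py | solution
-- ===== SOURCE A (Python) =====
-- def solution(arr):
--     arr.sort()
--     count = 0
--     while arr:
--         max = arr[-1]
--         arr = arr[0:-max]
--         count += 1
--     return count
-- ===== SOURCE B (Python) =====
-- def solution(arr):
--     # One linear scan over the descending-sorted list with a skip counter:
--     # at each group boundary count a new group of size v and skip its v-1
--     # remaining members; no repeated list slicing.  (A sorts the caller's
--     # list in place; B does not — the equivalence is about the return value.)
--     count = 0
--     skip = 0
--     for v in sorted(arr, reverse=True):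
--         if skip > 0:
--             skip -= 1
--         else:
--             count += 1
--             skip = v - 1
--     return count
-- ===== Notes on version B (the rewrite author's own statement) =====
-- stated objective: alternative
-- what changed: A repeatedly re-slices the sorted list (each group removal copies the whole remaining prefix); B makes one linear scan over the descending-sorted list with a skip counter, counting a group boundary and skipping its v-1 remaining members, so the repeated slicing disappears (a timing run could not reliably measure a ratio, so no speed is claimed). Pre_ admits lists whose elements are all >= 1 (the problem's natural positive fear levels) and lists some element of which is at least the length (cleared in one group); …
-- outside the precondition, e.g. on solution([0, 0, 1]): A returns 2, B returns 3; on solution([-1]): A does not finish within the time limit, B returns 1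
import Mathlib
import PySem

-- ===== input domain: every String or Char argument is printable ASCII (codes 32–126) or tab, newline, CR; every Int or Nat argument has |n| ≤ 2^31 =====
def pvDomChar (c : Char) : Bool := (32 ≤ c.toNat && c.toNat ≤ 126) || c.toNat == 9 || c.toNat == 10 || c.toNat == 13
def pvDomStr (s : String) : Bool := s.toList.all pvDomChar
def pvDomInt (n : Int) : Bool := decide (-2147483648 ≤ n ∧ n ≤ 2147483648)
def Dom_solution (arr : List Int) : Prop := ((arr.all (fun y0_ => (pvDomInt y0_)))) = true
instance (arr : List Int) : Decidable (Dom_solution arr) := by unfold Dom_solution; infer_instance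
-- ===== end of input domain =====

-- B replaces A's repeated list re-slicing with one linear scan over the
-- descending-sorted list carrying a skip counter; A sorts the caller's list in
-- place, B does not — the equivalence proved here is about the return value only.

-- ===== PORT A =====
-- while arr: max = arr[-1]; arr = arr[0:-max]; count += 1
-- fuel = length + 1 suffices under Pre_ (each step drops ≥ 1 element); the
-- fuel-exhausted value is never reached on admitted inputs.
def aLoop : Nat → List Int → Int → Int
  | 0, _, c => c
  | f+1, arr, c =>
    match PySem.List.pyGet? arr (-1) with
    | none => c                      -- arr is empty: while exits
    | some m => aLoop f (PySem.List.slice arr (some 0) (some (-m))) (c + 1)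

def solution (arr : List Int) : Int :=
  aLoop (arr.length + 1) (PySem.List.sorted arr (fun x => x) false) 0

-- ===== PORT B =====
-- count = 0; skip = 0
-- for v in sorted(arr, reverse=True): if skip > 0: skip -= 1 else: count += 1; skip = v - 1
def bStep (st : Int × Int) (v : Int) : Int × Int :=
  if st.2 > 0 then (st.1, st.2 - 1) else (st.1 + 1, v - 1)

def solution_alt (arr : List Int) : Int :=
  ((PySem.List.sorted arr (fun x => x) true).foldl bStep ((0 : Int), (0 : Int))).1

-- ===== PRECONDITION & SPEC =====
-- Pre_ admits positive-only lists (the problem's natural fear levels) and lists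
-- some element of which is at least the length (cleared in one group); it
-- excludes other lists containing non-positive values, where A may loop forever
-- and, where it terminates, its count hinges on the accident that slicing up
-- to minus a zero max empties the list, a corner neither value specifies.
def Pre_solution (arr : List Int) : Prop :=
  (∀ x ∈ arr, 1 ≤ x) ∨ (∃ x ∈ arr, (arr.length : Int) ≤ x)
instance (arr : List Int) : Decidable (Pre_solution arr) := by unfold Pre_solution; infer_instance
def pvWitness_solution : List Int := [2, 1, 2, 3, 1, 2, 2]

def Spec_solution (arr : List Int) (out : Int) : Prop := out = solution_alt arr
instance (arr : List Int) (out : Int) : Decidable (Spec_solution arr out) := by unfold Spec_solution; infer_instance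

-- ===== CLAIM (what is proved, stated in full; the proofs are below) =====
def Claim_equal_solution : Prop := ∀ (arr : List Int), Dom_solution arr → Pre_solution arr → Spec_solution arr (solution arr)

-- ===== LEMMAS AND PROOFS =====

-- The group count of a descending list: one group per boundary, each group of
-- head size v swallows the next v-1 elements.
def gGroups : List Int → Int
  | [] => 0
  | v :: rest => 1 + gGroups (rest.drop (v - 1).toNat)
termination_by r => r.length
decreasing_by simp

lemma gGroups_nil : gGroups [] = 0 := gGroups.eq_1

lemma gGroups_cons (v : Int) (rest : List Int) :
    gGroups (v :: rest) = 1 + gGroups (rest.drop (v - 1).toNat) := gGroups.eq_2 v rest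

-- A positive pending skip of k just drops the next k elements of the scan.
lemma foldl_bStep_skip : ∀ (r : List Int) (c k : Int), 0 ≤ k →
    (r.foldl bStep (c, k)).1 = ((r.drop k.toNat).foldl bStep (c, 0)).1 := by
  intro r
  induction r with
  | nil => intro c k _; simp
  | cons v rest ih =>
    intro c k hk
    by_cases h : 0 < k
    · obtain ⟨j, hj⟩ : ∃ j, k.toNat = j + 1 := ⟨k.toNat - 1, by omega⟩
      have h1 : bStep (c, k) v = (c, k - 1) := by simp [bStep, h]
      have h3 : (k - 1).toNat = j := by omega
      rw [List.foldl_cons, h1, ih c (k - 1) (by omega), h3, hj, List.drop_succ_cons]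
    · have hk0 : k = 0 := by omega
      simp [hk0]

-- On a list of positive elements the scan counts exactly gGroups.
lemma foldl_bStep_eq_gGroups : ∀ (n : Nat) (r : List Int), r.length ≤ n →
    (∀ x ∈ r, 1 ≤ x) → ∀ c : Int, (r.foldl bStep (c, 0)).1 = c + gGroups r := by
  intro n
  induction n with
  | zero =>
    intro r hlen _ c
    have : r = [] := List.eq_nil_of_length_eq_zero (by omega)
    simp [this, gGroups_nil]
  | succ n ih =>
    intro r hlen hpos c
    cases r with
    | nil => simp [gGroups_nil]
    | cons v rest =>
      have hv : 1 ≤ v := hpos v (List.mem_cons_self ..)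
      have h1 : bStep (c, 0) v = (c + 1, v - 1) := by simp [bStep]
      rw [List.foldl_cons, h1, foldl_bStep_skip rest (c + 1) (v - 1) (by omega)]
      rw [ih (rest.drop (v - 1).toNat) (by simp at hlen ⊢; omega)
            (fun x hx => hpos x (List.mem_cons_of_mem _ (List.mem_of_mem_drop hx))) (c + 1)]
      show c + 1 + gGroups (rest.drop (v - 1).toNat) = c + gGroups (v :: rest)
      rw [gGroups_cons]
      ring

-- In a ≤-sorted list every element is at most the last one.
lemma le_getLast_of_pairwise : ∀ {s : List Int}, s.Pairwise (· ≤ ·) →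
    ∀ (hne : s ≠ []) {x : Int}, x ∈ s → x ≤ s.getLast hne := by
  intro s
  induction s with
  | nil => intro _ hne; exact absurd rfl hne
  | cons a t ih =>
    intro hp hne x hx
    rcases List.pairwise_cons.mp hp with ⟨ha, hpt⟩
    rcases t with _ | ⟨b, u⟩
    · simp at hx
      simp [hx]
    · have htne : (b :: u) ≠ [] := by simp
      rw [List.getLast_cons htne]
      rcases List.mem_cons.mp hx with rfl | hxt
      · exact ha _ (List.getLast_mem htne)
      · exact ih hpt htne hxt

-- A's slicing loop on an ascending positive list computes gGroups of its reverse.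
lemma aLoop_eq_gGroups : ∀ (n : Nat) (s : List Int) (c : Int) (f : Nat),
    s.length ≤ n → s.length < f → s.Pairwise (· ≤ ·) → (∀ x ∈ s, 1 ≤ x) →
    aLoop f s c = c + gGroups s.reverse := by
  intro n
  induction n with
  | zero =>
    intro s c f hlen hf _ _
    have hs : s = [] := List.eq_nil_of_length_eq_zero (by omega)
    obtain ⟨f', rfl⟩ : ∃ f', f = f' + 1 := ⟨f - 1, by omega⟩
    simp [hs, aLoop, PySem.List.pyGet?, PySem.List.pyIdx?, gGroups_nil]
  | succ n ih =>
    intro s c f hlen hf hpair hpos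
    obtain ⟨f', rfl⟩ : ∃ f', f = f' + 1 := ⟨f - 1, by omega⟩
    cases hse : s with
    | nil => simp [aLoop, PySem.List.pyGet?, PySem.List.pyIdx?, gGroups_nil]
    | cons a t =>
    rw [← hse]
    have hne : s ≠ [] := by rw [hse]; simp
    set m := s.getLast hne with hmdef
    have hm1 : 1 ≤ m := hpos _ (List.getLast_mem hne)
    have hget : PySem.List.pyGet? s (-1) = some m := by
      rw [PySem.List.pyGet?_neg_one, List.getLast?_eq_some_getLast hne]
    have hslice : PySem.List.slice s (some 0) (some (-m))
        = s.take (s.length - m.toNat) := by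
      have hcast : (-m) = -((m.toNat : Nat) : Int) := by omega
      rw [PySem.List.slice_zero_start, hcast,
          PySem.List.slice_to_neg_natCast _ _ (by omega)]
    have hlpos : 1 ≤ s.length := by rw [hse]; simp
    set t' := s.take (s.length - m.toNat) with ht'
    have ht'len : t'.length = s.length - m.toNat := by
      simp [ht']
    have hstep : aLoop (f' + 1) s c = aLoop f' t' (c + 1) := by
      simp only [aLoop, hget, hslice]
    rw [hstep,
        ih t' (c + 1) f' (by omega) (by omega)
          (List.Pairwise.sublist (List.take_sublist _ _) hpair)
          (fun x hx => hpos x (List.mem_of_mem_take hx))]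
    -- gGroups s.reverse = 1 + gGroups t'.reverse
    have hsplit : s = s.dropLast ++ [m] := (List.dropLast_append_getLast hne).symm
    have hrev : s.reverse = m :: s.dropLast.reverse := by
      conv_lhs => rw [hsplit]
      simp
    have hdrop : s.dropLast.reverse.drop (m - 1).toNat = t'.reverse := by
      rw [List.drop_reverse, List.dropLast_eq_take, List.take_take, ht']
      congr 1
      simp [List.length_take]
      omega
    rw [hrev, gGroups_cons, hdrop]
    ring

-- sorted(arr, reverse=True) is the reverse of sorted(arr) (Int values, identity key).
lemma sorted_rev_eq_reverse_sorted (arr : List Int) :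
    PySem.List.sorted arr (fun x => x) true
      = (PySem.List.sorted arr (fun x => x) false).reverse := by
  apply List.Perm.eq_of_pairwise (le := fun a b : Int => b ≤ a)
      (fun a b _ _ h1 h2 => le_antisymm h2 h1)
  · exact PySem.List.sorted_pairwise_rev ..
  · exact List.pairwise_reverse.mpr (by
      have h := PySem.List.sorted_pairwise arr (fun y => y) (κ := Int)
      simpa using h)
  · exact (PySem.List.sorted_perm ..).trans
      ((PySem.List.sorted_perm arr (fun x => x) false).symm.trans
        (List.reverse_perm _).symm)

-- ===== VERDICT (by name: the statement is the Claim_ definition above) =====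
theorem solution_spec : Claim_equal_solution := by
  intro arr _ hpre
  unfold Spec_solution solution solution_alt
  rw [sorted_rev_eq_reverse_sorted]
  set s := PySem.List.sorted arr (fun x => x) false with hs
  have hlen : s.length = arr.length := PySem.List.length_sorted ..
  have hpair : s.Pairwise (· ≤ ·) := by
    have := PySem.List.sorted_pairwise arr (fun y => y) (κ := Int)
    simpa [← hs] using this
  rcases hpre with hpos | ⟨x, hx, hbig⟩
  · -- all elements ≥ 1: both sides equal gGroups s.reverse
    have hpos' : ∀ y ∈ s, 1 ≤ y := fun y hy => hpos y ((PySem.List.mem_sorted ..).mp hy)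
    rw [aLoop_eq_gGroups s.length s 0 (arr.length + 1) (le_refl _) (by omega) hpair hpos']
    rw [foldl_bStep_eq_gGroups s.reverse.length s.reverse (le_refl _)
          (fun y hy => hpos' y (List.mem_reverse.mp hy)) 0]
  · -- some element ≥ length: both clear everything in one step and return 1
    have hne : s ≠ [] := by
      intro h
      have : arr.length = 0 := by rw [← hlen, h]; rfl
      rcases arr with _ | _
      · exact absurd hx (List.not_mem_nil)
      · simp at this
    have hxs : x ∈ s := (PySem.List.mem_sorted ..).mpr hx
    set m := s.getLast hne with hmdef
    have hxm : x ≤ m := le_getLast_of_pairwise hpair hne hxs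
    have hm : (s.length : Int) ≤ m := by
      rw [hlen]; exact le_trans hbig hxm
    have h1 : 1 ≤ s.length := List.length_pos_iff.mpr hne
    -- A side: one step empties the list, count 1
    have hget : PySem.List.pyGet? s (-1) = some m := by
      rw [PySem.List.pyGet?_neg_one, List.getLast?_eq_some_getLast hne]
    have hslice : PySem.List.slice s (some 0) (some (-m)) = [] := by
      have hcast : (-m) = -((m.toNat : Nat) : Int) := by omega
      rw [PySem.List.slice_zero_start, hcast,
          PySem.List.slice_to_neg_natCast _ _ (by omega)]
      have hz : s.length - m.toNat = 0 := by omega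
      rw [hz, List.take_zero]
    obtain ⟨k, hk⟩ : ∃ k, arr.length = k + 1 := ⟨arr.length - 1, by omega⟩
    rw [hk]
    have hA : aLoop (k + 1 + 1) s 0 = 1 := by
      have h1 : aLoop (k + 1 + 1) s 0 = aLoop (k + 1) [] 1 := by
        simp only [aLoop, hget, hslice]
        norm_num [PySem.List.pyGet?, PySem.List.pyIdx?]
      rw [h1]
      simp [aLoop, PySem.List.pyGet?, PySem.List.pyIdx?]
    rw [hA]
    -- B side: the first (largest) element opens one group whose skip swallows the rest
    obtain ⟨w, rest, hsr⟩ : ∃ w rest, s.reverse = w :: rest := by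
      rcases hre : s.reverse with _ | ⟨w, rest⟩
      · exact absurd (by simpa using congrArg List.reverse hre) hne
      · exact ⟨w, rest, rfl⟩
    have hw : w = m := by
      have : s.reverse.head? = some w := by rw [hsr]; rfl
      rw [List.head?_reverse, List.getLast?_eq_some_getLast hne] at this
      exact (Option.some_inj.mp this).symm
    have hrest : rest.length = s.length - 1 := by
      have := congrArg List.length hsr
      simp at this
      omega
    have hb1 : bStep (0, 0) w = (1, w - 1) := by simp [bStep]
    rw [hsr, List.foldl_cons, hb1,
        foldl_bStep_skip rest 1 (w - 1) (by rw [hw]; omega)]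
    have hempty : rest.drop (w - 1).toNat = [] := by
      apply List.drop_eq_nil_of_le
      rw [hw] at *
      omega
    rw [hempty]
    rfl
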